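-- pv_equiv track=rewrite | github.com/Evilslive/EyeLink | lv1.py | divide_group
-- ===== SOURCE A (Python) =====
-- def divide_group(subj_no, group_no):
--     '''
--         分組 for lv2
--     '''
--     # except subj_no != group_no
--     g = list(set(group_no))
--     g.sort()
--     groups = [[] for i in range(len(g))]
--     for s, t in enumerate(g):
--         for i, j in enumerate(group_no):
--             if t == j:
--                 groups[s].append(subj_no[i])
--     return groups
-- ===== SOURCE B (Python) =====
-- def divide_group(subj_no, group_no):
--     '''
--         分組 for lv2
--     '''
--     buckets = {}
--     for i, t in enumerate(group_no):
--         buckets.setdefault(t, []).append(subj_no[i])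
--     return [buckets[t] for t in sorted(buckets)]
-- ===== Notes on version B (the rewrite author's own statement) =====
-- stated objective: faster
-- what changed: Replaces A's nested scan (one full pass over group_no per distinct label) with a single pass that groups into a dict of buckets, then emits the buckets in sorted-key order.
import Mathlib
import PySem

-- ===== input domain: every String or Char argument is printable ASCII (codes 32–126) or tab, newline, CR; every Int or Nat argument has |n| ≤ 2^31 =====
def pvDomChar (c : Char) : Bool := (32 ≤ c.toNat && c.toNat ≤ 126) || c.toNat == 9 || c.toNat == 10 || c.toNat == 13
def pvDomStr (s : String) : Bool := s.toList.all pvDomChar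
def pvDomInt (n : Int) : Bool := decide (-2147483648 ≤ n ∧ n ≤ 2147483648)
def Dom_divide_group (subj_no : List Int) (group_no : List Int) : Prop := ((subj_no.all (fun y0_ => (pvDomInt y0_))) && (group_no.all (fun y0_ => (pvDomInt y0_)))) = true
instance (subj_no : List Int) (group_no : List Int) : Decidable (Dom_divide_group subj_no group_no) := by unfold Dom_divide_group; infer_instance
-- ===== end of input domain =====

-- B groups subj_no by label in ONE pass over group_no (dict of buckets), then emits buckets in
-- sorted-key order, instead of A's one full rescan of group_no per distinct label.

-- ===== PORT A =====
-- g = sorted(set(group_no)); for each label t (index s), scan enumerate(group_no) appending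
-- subj_no[i] to groups[s] when t == j.  groups[s] is only touched during iteration s, so the
-- outer loop is a map over g; subj_no[i] is pyGetD (in range by Pre_).
def divide_group (subj_no : List Int) (group_no : List Int) : List (List Int) :=
  let g := PySem.List.sorted (PySem.Set.ofList group_no) (fun x => x) false
  g.map (fun t =>
    (PySem.List.enumerate group_no).foldl
      (fun acc p => if t = p.2 then acc ++ [PySem.List.pyGetD subj_no p.1 0] else acc) [])

-- ===== PORT B =====
-- buckets = {}; for i, t in enumerate(group_no): buckets.setdefault(t, []).append(subj_no[i])
-- return [buckets[t] for t in sorted(buckets)]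
def divide_group_alt (subj_no : List Int) (group_no : List Int) : List (List Int) :=
  let buckets : PySem.Dict Int (List Int) :=
    (PySem.List.enumerate group_no).foldl
      (fun d p => d.insert p.2 (d.getD p.2 [] ++ [PySem.List.pyGetD subj_no p.1 0]))
      PySem.Dict.empty
  (PySem.List.sorted buckets.keys (fun x => x) false).map (fun t => buckets.getD t [])

-- ===== PRECONDITION & SPEC =====
-- A (and B) raise IndexError at subj_no[i] whenever subj_no is shorter than group_no.
def Pre_divide_group (subj_no : List Int) (group_no : List Int) : Prop :=
  group_no.length ≤ subj_no.length
instance (subj_no : List Int) (group_no : List Int) : Decidable (Pre_divide_group subj_no group_no) := by unfold Pre_divide_group; infer_instance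
def pvWitness_divide_group : List Int × List Int := ([10, 20, 30], [2, 1, 2])

def Spec_divide_group (subj_no : List Int) (group_no : List Int) (out : List (List Int)) : Prop := out = divide_group_alt subj_no group_no
instance (subj_no : List Int) (group_no : List Int) (out : List (List Int)) : Decidable (Spec_divide_group subj_no group_no out) := by unfold Spec_divide_group; infer_instance

-- ===== CLAIM (what is proved, stated in full; the proofs are below) =====
def Claim_equal_divide_group : Prop := ∀ (subj_no : List Int) (group_no : List Int), Dom_divide_group subj_no group_no → Pre_divide_group subj_no group_no → Spec_divide_group subj_no group_no (divide_group subj_no group_no)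

-- ===== LEMMAS AND PROOFS =====

-- Reading one bucket of B's grouping fold: it is the start dict's bucket followed by the
-- matching appends, i.e. A's inner loop over the same enumerate list.
theorem bucket_getD (E : List (Int × Int)) (subj_no : List Int) (t : Int) :
    ∀ d : PySem.Dict Int (List Int),
      (E.foldl (fun d p => d.insert p.2 (d.getD p.2 [] ++ [PySem.List.pyGetD subj_no p.1 0])) d).getD t []
        = d.getD t [] ++ (E.filter (fun p => t = p.2)).map (fun p => PySem.List.pyGetD subj_no p.1 0) := by
  induction E with
  | nil => intro d; simp
  | cons e E ih =>
    intro d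
    simp only [List.foldl_cons, ih, List.filter_cons]
    by_cases h : t = e.2
    · subst h
      simp [PySem.Dict.getD_insert_self]
    · rw [PySem.Dict.getD_insert_of_ne _ _ _ h]
      simp [h]

-- The keys of B's bucket dict are exactly set(group_no) (first occurrences in order).
theorem bucket_keys (subj_no group_no : List Int) :
    ((PySem.List.enumerate group_no).foldl
      (fun d p => d.insert p.2 (d.getD p.2 [] ++ [PySem.List.pyGetD subj_no p.1 0]))
      (PySem.Dict.empty : PySem.Dict Int (List Int))).keys
      = PySem.Set.ofList group_no := by
  rw [PySem.Dict.keys_foldl_insert_key]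
  rw [PySem.List.map_snd_enumerate]
  rfl

-- ===== VERDICT (by name: the statement is the Claim_ definition above) =====
theorem divide_group_spec : Claim_equal_divide_group := by
  intro subj_no group_no _ _
  show divide_group subj_no group_no = divide_group_alt subj_no group_no
  simp only [divide_group, divide_group_alt, bucket_keys]
  refine List.map_congr_left (fun t _ => ?_)
  rw [bucket_getD]
  have hfun : (fun (acc : List Int) (p : Int × Int) =>
      if t = p.2 then acc ++ [PySem.List.pyGetD subj_no p.1 0] else acc)
    = fun acc p => if decide (t = p.2) = true then acc ++ [PySem.List.pyGetD subj_no p.1 0] else acc := by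
    funext acc p; simp
  rw [hfun, PySem.List.foldl_append_if]
  simp
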